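-- pv_equiv track=rewrite | github.com/prabowo02/inc-2025 | incp-problem/solutions/rafael_ac.py | solve
-- ===== SOURCE A (Python) =====
-- kEndOfChar = '_'
--
-- def IsConsonant(c):
--   if c == 'a' or c == 'i' or c == 'e' or c == 'o' or c == 'u':
--     return False
--   return True
--
-- def IsCase1(c):
--   if c == 'a' or c == 'o' or c == 'u':
--     return True
--   # Followed by a consonant other than h and y
--   if IsConsonant(c) and c != 'h' and c != 'y':
--     return True
--   # End of a word (represented by '_')
--   if c == kEndOfChar:
--     return True
--   return False
--
-- def IsCase2(c):
--   if c == 'e' or c == 'i' or c == 'y':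
--     return True
--   return False
--
-- def IsCase3(c):
--   if c == 'h':
--     return True
--   return False
--
-- def solve(word):
--   result = ''
--   skip_next = False
--   for i in range(len(word)):
--     if skip_next == True:
--       # Do nothing
--       skip_next = False
--     elif word[i] == 'c':
--       next_char = kEndOfChar
--       if i + 1 != len(word):
--         next_char = word[i + 1]
--       if IsCase1(next_char):
--         result += 'k'
--       elif IsCase2(next_char):
--         result += 's'
--       elif IsCase3(next_char):
--         result += 'c'
--         skip_next = True
--     else:
--       result += word[i]
--   return result
-- ===== SOURCE B (Python) =====
-- import re
--
-- def solve(word):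
--   return re.sub(
--       r'(c)(?=[eiy])|(ch)|c',
--       lambda m: 's' if m.group(1) else ('c' if m.group(2) else 'k'),
--       word)
-- ===== Notes on version B (the rewrite author's own statement) =====
-- stated objective: idiomatic
-- what changed: Replaced the index loop with a skip_next flag, an end-of-word sentinel character and four case-predicate helpers by a single re.sub with an ordered-alternation pattern (c lookahead-eiy, ch, bare c) and a group-dispatching replacement function.
import Mathlib
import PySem

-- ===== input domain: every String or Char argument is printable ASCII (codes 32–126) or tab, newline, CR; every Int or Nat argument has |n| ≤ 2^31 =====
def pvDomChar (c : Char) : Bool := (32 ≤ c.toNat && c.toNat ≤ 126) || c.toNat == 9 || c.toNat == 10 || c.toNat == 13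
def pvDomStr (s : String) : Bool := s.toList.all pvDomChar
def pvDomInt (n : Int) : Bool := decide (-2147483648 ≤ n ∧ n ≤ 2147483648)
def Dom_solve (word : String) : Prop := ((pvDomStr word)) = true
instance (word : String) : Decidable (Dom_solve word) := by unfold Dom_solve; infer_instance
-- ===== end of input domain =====

-- B replaces A's index loop + skip_next flag + '_' sentinel + case-predicate helpers by a single
-- regex substitution r'(c)(?=[eiy])|(ch)|c' (objective: idiomatic; same O(n) cost).

-- ===== PORT A =====
def kEndOfChar : Char := '_'

def IsConsonant (c : Char) : Bool :=
  if c = 'a' ∨ c = 'i' ∨ c = 'e' ∨ c = 'o' ∨ c = 'u' then false else true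

def IsCase1 (c : Char) : Bool :=
  if c = 'a' ∨ c = 'o' ∨ c = 'u' then true
  else if IsConsonant c = true ∧ c ≠ 'h' ∧ c ≠ 'y' then true
  else if c = kEndOfChar then true
  else false

def IsCase2 (c : Char) : Bool :=
  if c = 'e' ∨ c = 'i' ∨ c = 'y' then true else false

def IsCase3 (c : Char) : Bool :=
  if c = 'h' then true else false

-- A's for-loop over indices with lookahead word[i+1], as the obvious structural recursion
-- carrying the same (result, skip_next) state; the lookahead is the head of the rest.
def solveGo (skip : Bool) (cs : List Char) (result : List Char) : List Char :=
  match cs with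
  | [] => result
  | c :: rest =>
    if skip = true then
      -- Do nothing
      solveGo false rest result
    else if c = 'c' then
      let next : Char := match rest with | [] => kEndOfChar | r :: _ => r
      if IsCase1 next = true then solveGo false rest (result ++ ['k'])
      else if IsCase2 next = true then solveGo false rest (result ++ ['s'])
      else if IsCase3 next = true then solveGo true rest (result ++ ['c'])
      else solveGo false rest result
    else solveGo false rest (result ++ [c])

def solve (word : String) : String := String.mk (solveGo false word.toList [])

-- ===== PORT B =====
-- Hand-written, exact simulation of B's re.sub with the fixed pattern r'(c)(?=[eiy])|(ch)|c':
-- left-to-right non-overlapping scan; at each position the alternatives are tried in order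
-- (c with [eiy]-lookahead → 's', ch → 'c', c → 'k'); non-matching characters pass through.
def altGo : List Char → List Char
  | [] => []
  | c :: rest =>
    if c = 'c' then
      match rest with
      | r :: rest' =>
        if r = 'e' ∨ r = 'i' ∨ r = 'y' then 's' :: altGo (r :: rest')
        else if r = 'h' then 'c' :: altGo rest'
        else 'k' :: altGo (r :: rest')
      | [] => ['k']
    else c :: altGo rest

def solve_alt (word : String) : String := String.mk (altGo word.toList)

-- ===== PRECONDITION & SPEC =====
def Spec_solve (word : String) (out : String) : Prop := out = solve_alt word
instance (word : String) (out : String) : Decidable (Spec_solve word out) := by unfold Spec_solve; infer_instance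

-- ===== CLAIM (what is proved, stated in full; the proofs are below) =====
def Claim_equal_solve : Prop := ∀ (word : String), Dom_solve word → Spec_solve word (solve word)

-- ===== LEMMAS AND PROOFS =====
lemma isCase1_true (r : Char) (h : ¬(r = 'e' ∨ r = 'i' ∨ r = 'y') ) (hh : r ≠ 'h') :
    IsCase1 r = true := by
  simp [IsCase1, IsConsonant, kEndOfChar]
  simp only [not_or] at h
  obtain ⟨he, hi, hy⟩ := h
  by_cases ha : r = 'a'
  · tauto
  by_cases ho : r = 'o'
  · tauto
  by_cases hu : r = 'u'
  · tauto
  by_cases hi' : r = 'i'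
  · tauto
  tauto

lemma solveGo_eq_altGo (cs acc : List Char) :
    solveGo false cs acc = acc ++ altGo cs := by
  induction cs using altGo.induct generalizing acc with
  | case1 => simp [solveGo, altGo]
  | case2 r rest' heiy ih =>
    have h1 : IsCase1 r = false := by rcases heiy with h | h | h <;> subst h <;> decide
    have h2 : IsCase2 r = true := by simp [IsCase2, heiy]
    rw [solveGo]
    simp [h1, h2, ih, altGo, heiy]
  | case3 rest' hne ih =>
    have h1 : IsCase1 'h' = false := by decide
    have h2 : IsCase2 'h' = false := by decide
    have h3 : IsCase3 'h' = true := by decide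
    rw [solveGo]
    simp only [h1, h2, h3, if_false, if_true, Bool.false_eq_true]
    rw [solveGo.eq_def]
    simp [ih, altGo]
  | case4 r rest' heiy hh ih =>
    have h1 : IsCase1 r = true := isCase1_true r heiy hh
    rw [solveGo]
    simp [h1, ih, altGo, heiy, hh]
  | case5 =>
    have h1 : IsCase1 kEndOfChar = true := by decide
    rw [solveGo]
    simp [h1, altGo, solveGo]
  | case6 c rest hc ih =>
    rw [solveGo.eq_def, altGo.eq_def]
    simp [hc, ih]

-- ===== VERDICT (by name: the statement is the Claim_ definition above) =====
theorem solve_spec : Claim_equal_solve := by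
  intro word _
  unfold Spec_solve solve solve_alt
  rw [solveGo_eq_altGo]
  simp
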